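-- pv_equiv track=rewrite | github.com/faxrij/CENG133_LAB | lab9/example3.py | evens
-- ===== SOURCE A (Python) =====
-- def evens(n):
--     count=0
--     if len(n)==0:
--         return 0
--     else:
--         if n.pop()%2==0:
--             count=1
--     return count + evens(n)
-- ===== SOURCE B (Python) =====
-- def evens(n):
--     count = 0
--     while len(n) != 0:
--         if n.pop(0) % 2 == 0:
--             count += 1
--     return count
-- ===== Notes on version B (the rewrite author's own statement) =====
-- stated objective: simpler
-- what changed: Replaces A's non-tail recursion (pop from the back, add after the recursive call) with a plain iterative front-to-back while-pop loop and an accumulator; like A it empties the list; the proof shows traversal order does not change the count.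
import Mathlib
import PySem

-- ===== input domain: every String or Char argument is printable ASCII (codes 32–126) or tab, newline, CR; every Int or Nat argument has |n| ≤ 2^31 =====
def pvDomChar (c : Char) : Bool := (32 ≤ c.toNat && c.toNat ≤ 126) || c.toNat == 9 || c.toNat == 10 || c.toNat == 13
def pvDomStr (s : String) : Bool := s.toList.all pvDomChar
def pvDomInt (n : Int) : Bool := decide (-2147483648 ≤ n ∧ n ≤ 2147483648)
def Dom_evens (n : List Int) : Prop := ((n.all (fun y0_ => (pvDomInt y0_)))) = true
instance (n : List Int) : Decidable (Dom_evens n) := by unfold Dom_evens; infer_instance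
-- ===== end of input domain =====

-- B replaces A's non-tail recursion (popping from the back) with an iterative
-- front-to-back while-pop accumulator loop; equivalence of the RETURN value is
-- proved here (both versions also empty the caller's list in Python).

-- ===== PORT A =====
-- A: if list empty return 0; else pop last element, count=1 if it is even, return count + evens(rest)
def evens (n : List Int) : Int :=
  if n.length = 0 then 0
  else
    let count : Int := if PySem.Int.mod (n.getLast!) 2 = 0 then 1 else 0
    count + evens n.dropLast
termination_by n.length
decreasing_by
  simp [List.length_dropLast]
  omega

-- ===== PORT B =====
-- B: count = 0; while list nonempty: pop the FIRST element, count += 1 if even; return count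
def evensLoop (n : List Int) (count : Int) : Int :=
  match n with
  | [] => count
  | x :: rest => evensLoop rest (if PySem.Int.mod x 2 = 0 then count + 1 else count)

def evens_alt (n : List Int) : Int := evensLoop n 0

-- ===== PRECONDITION & SPEC =====
def Spec_evens (n : List Int) (out : Int) : Prop := out = evens_alt n
instance (n : List Int) (out : Int) : Decidable (Spec_evens n out) := by unfold Spec_evens; infer_instance

-- ===== CLAIM (what is proved, stated in full; the proofs are below) =====
def Claim_equal_evens : Prop := ∀ (n : List Int), Dom_evens n → Spec_evens n (evens n)

-- ===== LEMMAS AND PROOFS =====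
def evenCnt (n : List Int) : Int :=
  ((n.countP (fun x => decide (PySem.Int.mod x 2 = 0))) : Int)

theorem evenCnt_append_singleton (l : List Int) (a : Int) :
    evenCnt (l ++ [a]) = (if PySem.Int.mod a 2 = 0 then (1:Int) else 0) + evenCnt l := by
  simp only [evenCnt, List.countP_append, List.countP_cons, List.countP_nil]
  by_cases h : PySem.Int.mod a 2 = 0 <;> simp [h] <;> push_cast <;> omega

theorem evens_eq_evenCnt (n : List Int) : evens n = evenCnt n := by
  induction n using List.reverseRecOn with
  | nil => rw [evens]; simp [evenCnt]
  | append_singleton l a ih =>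
      rw [evens]
      have hgl : (l ++ [a]).getLast! = a := by
        cases l with
        | nil => rfl
        | cons x xs => unfold List.getLast!; simp
      simp [hgl, ih, evenCnt_append_singleton]

theorem evensLoop_eq (n : List Int) (c : Int) : evensLoop n c = c + evenCnt n := by
  induction n generalizing c with
  | nil => simp [evensLoop, evenCnt]
  | cons x rest ih =>
      simp only [evensLoop, ih, evenCnt, List.countP_cons]
      by_cases h : PySem.Int.mod x 2 = 0 <;> simp [h] <;> push_cast <;> omega

-- ===== VERDICT (by name: the statement is the Claim_ definition above) =====
theorem evens_spec : Claim_equal_evens := by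
  intro n _
  unfold Spec_evens evens_alt
  rw [evens_eq_evenCnt, evensLoop_eq]
  omega
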